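-- pv_equiv track=rewrite | github.com/MabudAlam/BugViper | common/diff_line_mapper.py | find_nearest_valid_line
-- ===== SOURCE A (Python) =====
-- from typing import Dict, List, Set, Tuple
--
-- def find_nearest_valid_line(
--     file_path: str,
--     line: int,
--     valid_lines: Dict[str, Set[int]],
--     max_distance: int = 5,
-- ) -> int | None:
--     """Find the nearest valid comment line when LLM reports an invalid line.
--
--     The LLM sometimes reports line numbers that don't exactly match the diff
--     (e.g., off by 1, or reporting a deleted line). This function finds
--     the closest line that IS valid for commenting.
--
--     Args:
--         file_path: Which file to check
--         line: Line number the LLM reported (may not be valid)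
--         valid_lines: Dict from get_valid_comment_lines()
--         max_distance: How far to search for a nearby valid line (default 5)
--
--     Returns:
--         The nearest valid line number, or None if nothing close exists
--
--     Example:
--         valid_lines = {"app.py": {10, 11, 12, 13, 14}}
--
--         find_nearest_valid_line("app.py", 10, valid_lines) → 10 (exact match)
--         find_nearest_valid_line("app.py", 11, valid_lines) → 11 (exact match)
--         find_nearest_valid_line("app.py", 15, valid_lines) → 14 (offset -1)
--         find_nearest_valid_line("app.py", 16, valid_lines) → None (too far)
--     """
--     # Check if file exists in our dict
--     if file_path not in valid_lines:
--         return None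
--
--     file_valid_lines = valid_lines[file_path]
--
--     # First check: is the exact line valid?
--     if line in file_valid_lines:
--         return line
--
--     # Second check: search nearby lines within max_distance
--     # Search outward: line+1, line-1, line+2, line-2, ...
--     for offset in range(1, max_distance + 1):
--         # Prefer lines AFTER the reported line (added lines)
--         if line + offset in file_valid_lines:
--             return line + offset
--         # Then try lines BEFORE (context lines)
--         if line - offset in file_valid_lines:
--             return line - offset
--
--     # No nearby valid line found
--     return None
-- ===== SOURCE B (Python) =====
-- def find_nearest_valid_line(
--     file_path,
--     line,
--     valid_lines,
--     max_distance=5,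
-- ):
--     """Pick the valid line closest to `line`, preferring the higher line on ties."""
--     lines = valid_lines.get(file_path)
--     if lines is None:
--         return None
--     if line in lines:
--         return line
--     candidates = [l for l in lines if abs(l - line) <= max_distance]
--     return min(candidates, key=lambda l: (abs(l - line), -l), default=None)
-- ===== Notes on version B (the rewrite author's own statement) =====
-- stated objective: simpler
-- what changed: Replaces A's outward offset-probing loop (line+1, line-1, line+2, ...) with a single filter of the valid set to candidates within max_distance followed by min with key (abs(l-line), -l), which reproduces the nearest-preferring-higher tie-break.
import Mathlib
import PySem

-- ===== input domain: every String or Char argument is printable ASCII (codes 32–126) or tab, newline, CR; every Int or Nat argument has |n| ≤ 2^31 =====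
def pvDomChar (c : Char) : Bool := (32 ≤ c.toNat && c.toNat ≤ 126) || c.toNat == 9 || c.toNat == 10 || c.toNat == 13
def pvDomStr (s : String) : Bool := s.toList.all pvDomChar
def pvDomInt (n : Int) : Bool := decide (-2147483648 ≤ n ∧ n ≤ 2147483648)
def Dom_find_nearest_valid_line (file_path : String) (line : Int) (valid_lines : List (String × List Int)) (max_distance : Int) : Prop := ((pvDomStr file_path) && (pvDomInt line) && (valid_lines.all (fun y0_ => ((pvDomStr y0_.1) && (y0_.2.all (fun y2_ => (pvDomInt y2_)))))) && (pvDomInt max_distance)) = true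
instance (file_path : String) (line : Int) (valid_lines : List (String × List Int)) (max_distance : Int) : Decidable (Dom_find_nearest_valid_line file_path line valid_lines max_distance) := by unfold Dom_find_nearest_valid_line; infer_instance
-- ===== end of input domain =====

-- B replaces A's outward offset-probing loop with filter-to-candidates + min by key (abs(l-line), -l): simpler.

-- ===== PORT A =====
-- A-side helper: the 'for offset in range(1, max_distance+1)' loop with its two probes and early returns
def pvSearchOut (s : List Int) (line : Int) : List Int → Option Int
  | [] => none
  | off :: rest =>
    if line + off ∈ s then some (line + off)
    else if line - off ∈ s then some (line - off)
    else pvSearchOut s line rest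

def find_nearest_valid_line (file_path : String) (line : Int) (valid_lines : List (String × List Int)) (max_distance : Int) : Option Int :=
  match valid_lines.lookup file_path with
  | none => none
  | some file_valid_lines =>
    if line ∈ file_valid_lines then some line
    else pvSearchOut file_valid_lines line (PySem.List.pyRange 1 (max_distance + 1) 1)

-- ===== PORT B =====
def find_nearest_valid_line_alt (file_path : String) (line : Int) (valid_lines : List (String × List Int)) (max_distance : Int) : Option Int :=
  match valid_lines.lookup file_path with
  | none => none
  | some lines =>
    if line ∈ lines then some line
    else
      PySem.List.min2? (lines.filter (fun l => decide (|l - line| ≤ max_distance)))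
        (fun l => |l - line|) (fun l => -l)

-- ===== PRECONDITION & SPEC =====
def Spec_find_nearest_valid_line (file_path : String) (line : Int) (valid_lines : List (String × List Int)) (max_distance : Int) (out : Option Int) : Prop := out = find_nearest_valid_line_alt file_path line valid_lines max_distance
instance (file_path : String) (line : Int) (valid_lines : List (String × List Int)) (max_distance : Int) (out : Option Int) : Decidable (Spec_find_nearest_valid_line file_path line valid_lines max_distance out) := by unfold Spec_find_nearest_valid_line; infer_instance

-- ===== CLAIM (what is proved, stated in full; the proofs are below) =====
def Claim_equal_find_nearest_valid_line : Prop := ∀ (file_path : String) (line : Int) (valid_lines : List (String × List Int)) (max_distance : Int), Dom_find_nearest_valid_line file_path line valid_lines max_distance → Spec_find_nearest_valid_line file_path line valid_lines max_distance (find_nearest_valid_line file_path line valid_lines max_distance)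

-- ===== LEMMAS AND PROOFS =====

-- the strict key order used by B: (abs(l-line), -l) lexicographically, stated on natAbs
def pvL (line a b : Int) : Prop :=
  (a - line).natAbs < (b - line).natAbs ∨ ((a - line).natAbs = (b - line).natAbs ∧ b < a)

lemma pvL_irrefl (line a : Int) : ¬ pvL line a a := by
  unfold pvL; omega

lemma pvL_trans {line a b c : Int} (h1 : pvL line a b) (h2 : pvL line b c) : pvL line a c := by
  unfold pvL at *; omega

lemma pvL_total {line a b : Int} (h1 : ¬ pvL line a b) (h2 : ¬ pvL line b a) : a = b := by
  unfold pvL at *; omega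

-- the comparison step inside min2? with B's keys, named for the proofs
def pvStep (line : Int) (acc : Option Int) (x : Int) : Option Int :=
  match acc with
  | none => some x
  | some m =>
    if (decide (|x - line| < |m - line|) || (!decide (|m - line| < |x - line|) && decide (-x < -m))) = true
    then some x else some m

lemma pv_min2_eq_foldl (line : Int) (C : List Int) :
    PySem.List.min2? C (fun l => |l - line|) (fun l => -l) = C.foldl (pvStep line) none := by
  unfold PySem.List.min2?
  congr 1
  funext acc x
  cases acc with
  | none => rfl
  | some m => rfl

lemma pv_cond_iff (line x m : Int) :
    ((decide (|x - line| < |m - line|) || (!decide (|m - line| < |x - line|) && decide (-x < -m))) = true)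
      ↔ pvL line x m := by
  simp only [Bool.or_eq_true, Bool.and_eq_true, Bool.not_eq_true', decide_eq_true_eq,
    decide_eq_false_iff_not, pvL, Int.abs_eq_natAbs]
  omega

lemma pvStep_pos {line x m : Int} (h : pvL line x m) : pvStep line (some m) x = some x := by
  show (if (decide (|x - line| < |m - line|) || (!decide (|m - line| < |x - line|) && decide (-x < -m))) = true
    then some x else some m) = some x
  rw [if_pos ((pv_cond_iff line x m).mpr h)]

lemma pvStep_neg {line x m : Int} (h : ¬ pvL line x m) : pvStep line (some m) x = some m := by
  show (if (decide (|x - line| < |m - line|) || (!decide (|m - line| < |x - line|) && decide (-x < -m))) = true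
    then some x else some m) = some m
  rw [if_neg (fun hc => h ((pv_cond_iff line x m).mp hc))]

-- spec of the fold underlying min2? once the accumulator is some
lemma pv_fold_spec (line : Int) :
    ∀ (C : List Int) (m : Int), ∃ r,
      C.foldl (pvStep line) (some m) = some r
      ∧ (r = m ∨ r ∈ C) ∧ (∀ l, (l = m ∨ l ∈ C) → ¬ pvL line l r) := by
  intro C
  induction C with
  | nil =>
    intro m
    refine ⟨m, rfl, Or.inl rfl, ?_⟩
    rintro l (rfl | hl)
    · exact pvL_irrefl line l
    · simp at hl
  | cons x xs ih =>
    intro m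
    by_cases h : pvL line x m
    · obtain ⟨r, hr, hmem, hmin⟩ := ih x
      refine ⟨r, ?_, ?_, ?_⟩
      · rw [List.foldl_cons, pvStep_pos h]; exact hr
      · rcases hmem with rfl | hm
        · exact Or.inr List.mem_cons_self
        · exact Or.inr (List.mem_cons_of_mem _ hm)
      · rintro l (rfl | hl)
        · exact fun hc => hmin x (Or.inl rfl) (pvL_trans h hc)
        · rcases List.mem_cons.mp hl with rfl | hl'
          · exact hmin l (Or.inl rfl)
          · exact hmin l (Or.inr hl')
    · obtain ⟨r, hr, hmem, hmin⟩ := ih m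
      refine ⟨r, ?_, ?_, ?_⟩
      · rw [List.foldl_cons, pvStep_neg h]; exact hr
      · rcases hmem with rfl | hm
        · exact Or.inl rfl
        · exact Or.inr (List.mem_cons_of_mem _ hm)
      · rintro l (rfl | hl)
        · exact hmin l (Or.inl rfl)
        · rcases List.mem_cons.mp hl with rfl | hl'
          · intro hc
            by_cases hmx : pvL line m l
            · exact hmin m (Or.inl rfl) (pvL_trans hmx hc)
            · exact hmin m (Or.inl rfl) ((pvL_total h hmx) ▸ hc)
          · exact hmin l (Or.inr hl')

lemma pv_min2_spec {line : Int} {C : List Int} {r : Int}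
    (h : PySem.List.min2? C (fun l => |l - line|) (fun l => -l) = some r) :
    r ∈ C ∧ ∀ l ∈ C, ¬ pvL line l r := by
  rw [pv_min2_eq_foldl] at h
  cases C with
  | nil => simp at h
  | cons x xs =>
    obtain ⟨r', hr', hmem, hmin⟩ := pv_fold_spec line xs x
    rw [List.foldl_cons] at h
    have hx : pvStep line none x = some x := rfl
    rw [hx, hr'] at h
    cases h
    constructor
    · rcases hmem with rfl | hm
      · exact List.mem_cons_self
      · exact List.mem_cons_of_mem _ hm
    · intro l hl
      rcases List.mem_cons.mp hl with rfl | hl'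
      · exact hmin l (Or.inl rfl)
      · exact hmin l (Or.inr hl')

lemma pv_min2_none {line : Int} {C : List Int}
    (h : C = []) : PySem.List.min2? C (fun l => |l - line|) (fun l => -l) = none := by
  subst h; rfl

lemma pv_min2_unique {line : Int} {C : List Int} {r : Int}
    (hr : r ∈ C) (hmin : ∀ l ∈ C, ¬ pvL line l r) :
    PySem.List.min2? C (fun l => |l - line|) (fun l => -l) = some r := by
  cases hE : PySem.List.min2? C (fun l => |l - line|) (fun l => -l) with
  | none =>
    cases C with
    | nil => simp at hr
    | cons x xs =>
      obtain ⟨r', hr', _, _⟩ := pv_fold_spec line xs x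
      rw [pv_min2_eq_foldl, List.foldl_cons] at hE
      have hx : pvStep line none x = some x := rfl
      rw [hx, hr'] at hE
      cases hE
  | some r' =>
    obtain ⟨hr'm, hmin'⟩ := pv_min2_spec hE
    have h1 : ¬ pvL line r r' := hmin' r hr
    have h2 : ¬ pvL line r' r := hmin r' hr'm
    rw [pvL_total h1 h2]

-- proof-side view of the offsets list [j, j+1, ..., j+n-1]
def pvOffs (j : Int) : Nat → List Int
  | 0 => []
  | n + 1 => j :: pvOffs (j + 1) n

lemma pv_pyRange_eq_offs : ∀ (n : Nat) (a : Int), PySem.List.pyRange a (a + n) 1 = pvOffs a n := by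
  intro n
  induction n with
  | zero => intro a; exact PySem.List.pyRange_one_eq_nil (by omega)
  | succ n ih =>
    intro a
    rw [PySem.List.pyRange_one_cons (by push_cast; omega)]
    have h1 : a + ((n + 1 : Nat) : Int) = (a + 1) + (n : Int) := by push_cast; ring
    rw [h1, ih (a + 1)]
    rfl

-- core equivalence: A's outward probe over offsets j..j+n-1 computes B's min over candidates within b = j+n-1
lemma pv_search_eq_min (line : Int) (s : List Int) :
    ∀ (n : Nat) (j b : Int), 1 ≤ j → b = j + n - 1 →
      (∀ l ∈ s, j ≤ ((l - line).natAbs : Int)) →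
      pvSearchOut s line (pvOffs j n)
        = PySem.List.min2? (s.filter (fun l => decide (|l - line| ≤ b)))
            (fun l => |l - line|) (fun l => -l) := by
  intro n
  induction n with
  | zero =>
    intro j b hj hb hinv
    have hfil : s.filter (fun l => decide (|l - line| ≤ b)) = [] := by
      apply List.filter_eq_nil_iff.mpr
      intro l hl
      have := hinv l hl
      simp only [decide_eq_true_eq, Int.abs_eq_natAbs, not_le]
      omega
    rw [pv_min2_none hfil]; rfl
  | succ n ih =>
    intro j b hj hb hinv
    show pvSearchOut s line (j :: pvOffs (j + 1) n) = _
    unfold pvSearchOut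
    by_cases hp : line + j ∈ s
    · simp only [hp, if_true]
      symm
      apply pv_min2_unique
      · apply List.mem_filter.mpr
        refine ⟨hp, ?_⟩
        simp only [decide_eq_true_eq, Int.abs_eq_natAbs]
        omega
      · intro l hl
        obtain ⟨hls, _⟩ := List.mem_filter.mp hl
        have := hinv l hls
        unfold pvL
        omega
    · by_cases hq : line - j ∈ s
      · simp only [hp, if_false, hq, if_true]
        symm
        apply pv_min2_unique
        · apply List.mem_filter.mpr
          refine ⟨hq, ?_⟩
          simp only [decide_eq_true_eq, Int.abs_eq_natAbs]
          omega
        · intro l hl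
          obtain ⟨hls, _⟩ := List.mem_filter.mp hl
          have h1 := hinv l hls
          have h2 : l ≠ line + j := fun he => hp (he ▸ hls)
          unfold pvL
          omega
      · simp only [hp, if_false, hq, if_false]
        have hinv' : ∀ l ∈ s, j + 1 ≤ ((l - line).natAbs : Int) := by
          intro l hls
          have h1 := hinv l hls
          have h2 : l ≠ line + j := fun he => hp (he ▸ hls)
          have h3 : l ≠ line - j := fun he => hq (he ▸ hls)
          omega
        rw [ih (j + 1) b (by omega) (by omega) hinv']

-- ===== VERDICT (by name: the statement is the Claim_ definition above) =====
theorem find_nearest_valid_line_spec : Claim_equal_find_nearest_valid_line := by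
  intro file_path line valid_lines max_distance _
  unfold Spec_find_nearest_valid_line find_nearest_valid_line find_nearest_valid_line_alt
  cases hlk : valid_lines.lookup file_path with
  | none => rfl
  | some s =>
    by_cases hline : line ∈ s
    · simp [hline]
    · simp only [hline, if_false]
      by_cases hmd : 1 ≤ max_distance
      · have hn : max_distance + 1 = 1 + ((max_distance.toNat : Int)) := by omega
        rw [hn, pv_pyRange_eq_offs]
        have hinv : ∀ l ∈ s, (1 : Int) ≤ ((l - line).natAbs : Int) := by
          intro l hl
          have h2 : l ≠ line := fun he => hline (he ▸ hl)
          omega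
        exact pv_search_eq_min line s max_distance.toNat 1 max_distance le_rfl (by omega) hinv
      · rw [PySem.List.pyRange_one_eq_nil (by omega)]
        have hfil : s.filter (fun l => decide (|l - line| ≤ max_distance)) = [] := by
          apply List.filter_eq_nil_iff.mpr
          intro l hl
          have h2 : l ≠ line := fun he => hline (he ▸ hl)
          simp only [decide_eq_true_eq, Int.abs_eq_natAbs, not_le]
          omega
        rw [pv_min2_none hfil]; rfl
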